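-- pv_equiv track=rewrite | github.com/MissHead/analise_algoritmos | algoritmos_gulosos/busca_padroes/boyer_moore.py | menor_sequenciap
-- ===== SOURCE A (Python) =====
-- def menor_sequenciap(n):
--     menor = [0] * len(n)
--     for i in range(len(n)):
--         if n[i] == i+1:
--             menor[len(n)-i-1] = i+1
--     for i in range(len(n)-2, -1, -1):
--         if menor[i] == 0:
--             menor[i] = menor[i+1]
--     return menor
-- ===== SOURCE B (Python) =====
-- def menor_sequenciap(n):
--     out = []
--     last = 0
--     for i, v in enumerate(n):
--         if v == i + 1:
--             last = i + 1
--         out.append(last)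
--     out.reverse()
--     return out
-- ===== Notes on version B (the rewrite author's own statement) =====
-- stated objective: simpler
-- what changed: Replaces A's two array passes (scatter marks into a reversed position array, then back-fill zeros right-to-left) with a single left-to-right scan threading a running 'last mark' carry, appending to a list and reversing it once.
import Mathlib
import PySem

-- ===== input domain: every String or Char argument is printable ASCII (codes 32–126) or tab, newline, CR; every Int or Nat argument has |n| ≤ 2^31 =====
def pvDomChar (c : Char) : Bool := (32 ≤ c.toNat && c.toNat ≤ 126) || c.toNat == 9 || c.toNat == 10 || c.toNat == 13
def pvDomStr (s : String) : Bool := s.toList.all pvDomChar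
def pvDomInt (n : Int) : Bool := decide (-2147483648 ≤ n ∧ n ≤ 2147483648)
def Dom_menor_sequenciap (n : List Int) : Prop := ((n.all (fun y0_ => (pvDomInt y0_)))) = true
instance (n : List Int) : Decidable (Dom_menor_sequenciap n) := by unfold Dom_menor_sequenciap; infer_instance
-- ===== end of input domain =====

-- B replaces A's two passes (mark-scatter into a reversed array + right-to-left zero back-fill)
-- by one forward scan threading a running carry, then a single reverse; same O(n) cost, simpler.


-- ===== PORT A =====
def menor_sequenciap (n : List Int) : List Int :=
  let menor : List Int := List.replicate n.length 0
  let menor := (PySem.List.pyRange 0 (n.length : Int) 1).foldl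
    (fun m i => if PySem.List.pyGetD n i 0 = i + 1
                then PySem.List.pySetD m ((n.length : Int) - i - 1) (i + 1) else m) menor
  let menor := (PySem.List.pyRange ((n.length : Int) - 2) (-1) (-1)).foldl
    (fun m i => if PySem.List.pyGetD m i 0 = 0
                then PySem.List.pySetD m i (PySem.List.pyGetD m (i + 1) 0) else m) menor
  menor

-- ===== PORT B =====
def menor_sequenciap_alt (n : List Int) : List Int :=
  let st := (PySem.List.enumerate n 0).foldl
    (fun (st : List Int × Int) (p : Int × Int) =>
      let last := if p.2 = p.1 + 1 then p.1 + 1 else st.2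
      (st.1 ++ [last], last)) ([], 0)
  st.1.reverse

-- ===== PRECONDITION & SPEC =====
def Spec_menor_sequenciap (n : List Int) (out : List Int) : Prop := out = menor_sequenciap_alt n
instance (n : List Int) (out : List Int) : Decidable (Spec_menor_sequenciap n out) := by unfold Spec_menor_sequenciap; infer_instance

-- ===== CLAIM (what is proved, stated in full; the proofs are below) =====
def Claim_equal_menor_sequenciap : Prop := ∀ (n : List Int), Dom_menor_sequenciap n → Spec_menor_sequenciap n (menor_sequenciap n)

-- ===== LEMMAS AND PROOFS =====

-- the mark A's first pass writes for source index j (0 when n[j] ≠ j+1)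
def pvMark (n : List Int) (j : Nat) : Int :=
  if n.getD j 0 = (j : Int) + 1 then (j : Int) + 1 else 0

-- the list of marks of l, source indices starting at i0 (in source order)
def pvMarks : List Int → Nat → List Int
  | [], _ => []
  | v :: t, i0 => (if v = (i0 : Int) + 1 then (i0 : Int) + 1 else 0) :: pvMarks t (i0 + 1)

-- forward zero back-fill with carry c (abstract form of A's second pass, read right-to-left)
def pvBf : List Int → Int → List Int
  | [], _ => []
  | x :: t, c => let y := if x = 0 then c else x
                 y :: pvBf t y

-- B's forward scan: running last-mark carry
def pvScan : List Int → Nat → Int → List Int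
  | [], _, _ => []
  | v :: t, i0, c =>
      let c' := if v = (i0 : Int) + 1 then (i0 : Int) + 1 else c
      c' :: pvScan t (i0 + 1) c'

theorem pvBf_marks_eq_scan (l : List Int) (i0 : Nat) (c : Int) :
    pvBf (pvMarks l i0) c = pvScan l i0 c := by
  induction l generalizing i0 c with
  | nil => rfl
  | cons v t ih =>
    simp only [pvMarks, pvBf, pvScan]
    by_cases hv : v = (i0 : Int) + 1
    · simp only [if_pos hv, if_neg (by omega : ¬((i0:Int)+1 = 0))]
      rw [ih]
    · rw [if_neg hv]
      have h0 : (if (0:Int) = 0 then c else (0:Int)) = c := if_pos rfl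
      rw [h0, ih, if_neg hv]

theorem pvAlt_fold (l : List Int) (i0 : Nat) (c : Int) (acc : List Int) :
    ((PySem.List.enumerate l (i0 : Int)).foldl
      (fun (st : List Int × Int) (p : Int × Int) =>
        let last := if p.2 = p.1 + 1 then p.1 + 1 else st.2
        (st.1 ++ [last], last)) (acc, c)).1 = acc ++ pvScan l i0 c := by
  induction l generalizing i0 c acc with
  | nil => simp [PySem.List.enumerate_nil, pvScan]
  | cons v t ih =>
    rw [PySem.List.enumerate_cons]
    simp only [List.foldl_cons]
    have : ((i0 : Int) + 1) = ((i0 + 1 : Nat) : Int) := by push_cast; ring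
    rw [this, ih]
    simp [pvScan, ← this]

theorem pvMarks_length (l : List Int) (i0 : Nat) : (pvMarks l i0).length = l.length := by
  induction l generalizing i0 with
  | nil => rfl
  | cons v t ih => simp [pvMarks, ih]

theorem pvMarks_getElem (l : List Int) (i0 j : Nat) (h : j < l.length) :
    (pvMarks l i0)[j]'(by rw [pvMarks_length]; exact h)
      = if l.getD j 0 = (i0 : Int) + (j : Int) + 1 then (i0 : Int) + (j : Int) + 1 else 0 := by
  induction l generalizing i0 j with
  | nil => simp at h
  | cons v t ih =>
    cases j with
    | zero =>
      simp only [pvMarks, List.getElem_cons_zero, List.getD_cons_zero, Nat.cast_zero, add_zero]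
    | succ j =>
      simp only [pvMarks, List.getElem_cons_succ, List.getD_cons_succ]
      rw [ih (i0 + 1) j (by simpa using h)]
      have hc : ((i0 + 1 : Nat) : Int) + (j : Int) + 1 = (i0 : Int) + ((j + 1 : Nat) : Int) + 1 := by
        push_cast; ring
      rw [hc]

theorem pvPhase1_eq (n : List Int) (k : Nat) (hk : k ≤ n.length) :
    (PySem.List.pyRange 0 (k : Int) 1).foldl
      (fun m i => if PySem.List.pyGetD n i 0 = i + 1
                  then PySem.List.pySetD m ((n.length : Int) - i - 1) (i + 1) else m)
      (List.replicate n.length 0)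
    = (List.range n.length).map
        (fun q => if n.length - k ≤ q then pvMark n (n.length - 1 - q) else 0) := by
  induction k with
  | zero =>
    rw [show ((0:Nat):Int) = 0 by norm_num, PySem.List.pyRange_one_eq_nil le_rfl]
    simp only [List.foldl_nil]
    apply List.ext_getElem
    · simp
    · intro q h1 h2
      simp only [List.length_replicate] at h1
      simp only [List.getElem_replicate, List.getElem_map, List.getElem_range]
      rw [if_neg (by omega)]
  | succ k ih =>
    have hk' : k ≤ n.length := by omega
    rw [show ((k+1:Nat):Int) = (k:Int)+1 by push_cast; ring,
        PySem.List.pyRange_one_succ_right (by positivity), List.foldl_append, ih hk']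
    simp only [List.foldl_cons, List.foldl_nil, PySem.List.pyGetD_natCast]
    by_cases hc : n.getD k 0 = (k : Int) + 1
    · rw [if_pos hc]
      rw [show ((n.length : Int) - (k:Int) - 1) = ((n.length - 1 - k : Nat) : Int) by omega,
          PySem.List.pySetD_natCast]
      apply List.ext_getElem
      · simp
      · intro q h1 h2
        simp only [List.length_set, List.length_map, List.length_range] at h1 h2 ⊢
        rw [List.getElem_set]
        simp only [List.getElem_map, List.getElem_range]
        by_cases hq : n.length - 1 - k = q
        · rw [if_pos hq, if_pos (by omega)]
          subst hq
          rw [show n.length - 1 - (n.length - 1 - k) = k by omega]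
          unfold pvMark
          rw [if_pos hc]
        · rw [if_neg hq]
          by_cases h3 : n.length - k ≤ q
          · rw [if_pos h3, if_pos (by omega)]
          · rw [if_neg h3, if_neg (by omega)]
    · rw [if_neg hc]
      apply List.map_congr_left
      intro q hq
      simp only [List.mem_range] at hq
      by_cases hq2 : n.length - 1 - k = q
      · subst hq2
        rw [if_neg (by omega), if_pos (by omega),
            show n.length - 1 - (n.length - 1 - k) = k by omega]
        unfold pvMark
        rw [if_neg hc]
      · by_cases h3 : n.length - k ≤ q
        · rw [if_pos h3, if_pos (by omega)]
        · rw [if_neg h3, if_neg (by omega)]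

theorem pvPhase1_rev (n : List Int) :
    ((List.range n.length).map (fun q => pvMark n (n.length - 1 - q))).reverse
    = (List.range n.length).map (pvMark n) := by
  apply List.ext_getElem
  · simp
  · intro q h1 h2
    simp only [List.length_reverse, List.length_map, List.length_range] at h1 h2
    rw [List.getElem_reverse]
    simp only [List.getElem_map, List.getElem_range, List.length_map, List.length_range]
    congr 1
    omega

theorem pvBf_append (l : List Int) (x c : Int) :
    pvBf (l ++ [x]) c = pvBf l c ++ [if x = 0 then (pvBf l c).getLastD c else x] := by
  induction l generalizing c with
  | nil => simp [pvBf]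
  | cons a t ih =>
    simp only [List.cons_append, pvBf, ih, List.getLastD_cons]

-- the filled suffix of m from position j, in original order
def pvFs (m : List Int) (j : Nat) : List Int := (pvBf (m.drop j).reverse 0).reverse

theorem pvRevGetDZero (l : List Int) : l.reverse.getD 0 0 = l.getLastD 0 := by
  rcases l.eq_nil_or_concat with rfl | ⟨t, x, rfl⟩
  · rfl
  · simp

theorem pvFs_cons (m : List Int) (j : Nat) (hj : j < m.length) :
    pvFs m j = (if m[j] = 0 then (pvBf (m.drop (j+1)).reverse 0).getLastD 0 else m[j])
      :: pvFs m (j+1) := by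
  unfold pvFs
  rw [List.drop_eq_getElem_cons hj, List.reverse_cons, pvBf_append, List.reverse_append]
  simp

theorem pvFs_getD_zero (m : List Int) (j : Nat) :
    (pvFs m j).getD 0 0 = (pvBf (m.drop j).reverse 0).getLastD 0 := by
  unfold pvFs
  exact pvRevGetDZero _

theorem pvLoop2 (m : List Int) (j : Nat) (hj : j ≤ m.length) :
    (PySem.List.pyRange ((j : Int) - 1) (-1) (-1)).foldl
      (fun m' i => if PySem.List.pyGetD m' i 0 = 0
                   then PySem.List.pySetD m' i (PySem.List.pyGetD m' (i + 1) 0) else m')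
      (m.take j ++ pvFs m j)
    = pvFs m 0 := by
  induction j with
  | zero =>
    rw [show ((0:Nat):Int) - 1 = -1 by norm_num, PySem.List.pyRange_neg_one_eq_nil le_rfl]
    simp
  | succ j ih =>
    have hj' : j < m.length := by omega
    rw [show ((j+1:Nat):Int) - 1 = (j:Int) by push_cast; ring,
        PySem.List.pyRange_neg_one_cons (by omega : (-1:Int) < (j:Int)),
        List.foldl_cons]
    have hlen : (m.take (j+1)).length = j + 1 := by rw [List.length_take]; omega
    have htake : m.take (j+1) = m.take j ++ [m[j]] := by
      rw [List.take_add_one]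
      simp [List.getElem?_eq_getElem hj']
    have hlj : (m.take j).length = j := by rw [List.length_take]; omega
    have hget : PySem.List.pyGetD (m.take (j+1) ++ pvFs m (j+1)) ((j:Int)) 0 = m[j] := by
      rw [PySem.List.pyGetD_natCast, List.getD_eq_getElem?_getD,
          List.getElem?_append_left (by omega), htake,
          List.getElem?_append_right (by omega), hlj]
      simp
    have hget1 : PySem.List.pyGetD (m.take (j+1) ++ pvFs m (j+1)) ((j:Int) + 1) 0
        = (pvBf (m.drop (j+1)).reverse 0).getLastD 0 := by
      rw [show ((j:Int) + 1) = ((j+1:Nat):Int) by push_cast; ring,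
          PySem.List.pyGetD_natCast, List.getD_eq_getElem?_getD,
          List.getElem?_append_right (by omega), hlen, Nat.sub_self,
          ← List.getD_eq_getElem?_getD, pvFs_getD_zero]
    have hQ : (if PySem.List.pyGetD (m.take (j+1) ++ pvFs m (j+1)) ((j:Int)) 0 = 0
               then PySem.List.pySetD (m.take (j+1) ++ pvFs m (j+1)) ((j:Int))
                      (PySem.List.pyGetD (m.take (j+1) ++ pvFs m (j+1)) ((j:Int) + 1) 0)
               else m.take (j+1) ++ pvFs m (j+1))
        = m.take j ++ pvFs m j := by
      rw [hget, hget1]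
      by_cases h0 : m[j] = (0:Int)
      · rw [if_pos h0, show ((j:Int)) = ((j:Nat):Int) from rfl, PySem.List.pySetD_natCast,
            List.set_append, if_pos (by omega), htake, List.set_append, if_neg (by omega),
            hlj, Nat.sub_self]
        rw [pvFs_cons m j hj', if_pos h0]
        simp [List.append_assoc, List.set]
      · rw [if_neg h0, pvFs_cons m j hj', if_neg h0]
        simp only [htake, List.append_assoc, List.singleton_append]
    rw [hQ, ih (by omega)]

theorem pvPhase2_eq (m : List Int) :
    (PySem.List.pyRange ((m.length : Int) - 2) (-1) (-1)).foldl
      (fun m' i => if PySem.List.pyGetD m' i 0 = 0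
                   then PySem.List.pySetD m' i (PySem.List.pyGetD m' (i + 1) 0) else m')
      m
    = (pvBf m.reverse 0).reverse := by
  rcases Nat.eq_zero_or_pos m.length with h0 | hpos
  · rw [PySem.List.pyRange_neg_one_eq_nil (by omega), List.foldl_nil]
    have : m = [] := List.eq_nil_of_length_eq_zero h0
    subst this; rfl
  · have hlen1 : (m.drop (m.length - 1)).length = 1 := by rw [List.length_drop]; omega
    obtain ⟨x, hx⟩ := List.length_eq_one_iff.mp hlen1
    have h2 : m = m.take (m.length - 1) ++ pvFs m (m.length - 1) := by
      unfold pvFs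
      rw [hx, List.reverse_singleton]
      have hbf : pvBf [x] 0 = [x] := by by_cases h : x = 0 <;> simp [pvBf, h]
      rw [hbf, List.reverse_singleton, ← hx, List.take_append_drop]
    have h1 : ((m.length : Int) - 2) = ((m.length - 1 : Nat) : Int) - 1 := by omega
    calc (PySem.List.pyRange ((m.length : Int) - 2) (-1) (-1)).foldl
          (fun m' i => if PySem.List.pyGetD m' i 0 = 0
                   then PySem.List.pySetD m' i (PySem.List.pyGetD m' (i + 1) 0) else m') m
        = (PySem.List.pyRange (((m.length - 1 : Nat) : Int) - 1) (-1) (-1)).foldl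
          (fun m' i => if PySem.List.pyGetD m' i 0 = 0
                   then PySem.List.pySetD m' i (PySem.List.pyGetD m' (i + 1) 0) else m')
          (m.take (m.length - 1) ++ pvFs m (m.length - 1)) := by rw [← h1, ← h2]
      _ = pvFs m 0 := pvLoop2 m (m.length - 1) (by omega)
      _ = (pvBf m.reverse 0).reverse := by unfold pvFs; rw [List.drop_zero]

-- ===== VERDICT (by name: the statement is the Claim_ definition above) =====
theorem menor_sequenciap_spec : Claim_equal_menor_sequenciap := by
  intro n _
  unfold Spec_menor_sequenciap
  have halt : menor_sequenciap_alt n = (pvScan n 0 0).reverse := by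
    have h := pvAlt_fold n 0 0 []
    simp only [Nat.cast_zero, List.nil_append] at h
    simp only [menor_sequenciap_alt]
    rw [h]
  have hA : menor_sequenciap n
      = (pvBf ((List.range n.length).map (fun q => pvMark n (n.length - 1 - q))).reverse 0).reverse := by
    simp only [menor_sequenciap]
    rw [pvPhase1_eq n n.length le_rfl]
    have hfun : (List.range n.length).map
          (fun q => if n.length - n.length ≤ q then pvMark n (n.length - 1 - q) else 0)
        = (List.range n.length).map (fun q => pvMark n (n.length - 1 - q)) := by
      apply List.map_congr_left
      intro q hq
      rw [if_pos (by omega)]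
    rw [hfun]
    have hm : ((List.range n.length).map (fun q => pvMark n (n.length - 1 - q))).length = n.length := by
      simp
    rw [show ((n.length : Int))
        = (((List.range n.length).map (fun q => pvMark n (n.length - 1 - q))).length : Int) by rw [hm]]
    exact pvPhase2_eq _
  have hmk : (List.range n.length).map (pvMark n) = pvMarks n 0 := by
    apply List.ext_getElem
    · simp [pvMarks_length]
    · intro q h1 h2
      simp only [List.getElem_map, List.getElem_range]
      rw [pvMarks_getElem n 0 q (by rw [pvMarks_length] at h2; exact h2)]
      unfold pvMark
      norm_num
  rw [hA, halt, pvPhase1_rev, hmk, pvBf_marks_eq_scan]
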